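-- pv_equiv track=rewrite | github.com/triggerhappyspartan/VERACS | veraCS.py | return_triangular_string
-- ===== SOURCE A (Python) =====
-- def return_triangular_string(list_,whitespace):
--     """
--     Returns the genome as a single triangular string
--     Used for octant symmetry in PWR fuel lattices and diagonal symmetry
--     in BWR fuel lattices.
--     """
--     triangular_string = whitespace
--     column = 0
--     row    = 1
--     for item in list_:
--         if type(item) is str:
--             entry = item
--         elif type(item) == list:
--             print_line = "Function return_triangular_string does not accept lists as an indice in the triangle"
--             raise TypeError(print_line)
--         elif type(item) == set:
--             print_line = "Function return_triangular_string does not accept sets as an indice in the triangle"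
--             raise TypeError(print_line)
--         elif type(item) == dict:
--             print_line = "Function return_triangular_string does not accept dictionaries as an indice in the triangle"
--             raise TypeError(print_line)
--         else:
--             entry = str(item)
--         triangular_string += entry.ljust(3)
--         column +=1
--         if row == column:
--             triangular_string += "\n"+whitespace
--             column = 0
--             row +=1
--
--     return triangular_string
-- ===== SOURCE B (Python) =====
-- def _entry(item):
--     if type(item) is str:
--         return item
--     elif type(item) == list:
--         raise TypeError("Function return_triangular_string does not accept lists as an indice in the triangle")
--     elif type(item) == set:
--         raise TypeError("Function return_triangular_string does not accept sets as an indice in the triangle")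
--     elif type(item) == dict:
--         raise TypeError("Function return_triangular_string does not accept dictionaries as an indice in the triangle")
--     else:
--         return str(item)
--
--
-- def return_triangular_string(list_, whitespace):
--     """Triangular layout built row-wise: slice the formatted entries into rows of
--     sizes 1, 2, 3, ... and join the pieces once at the end."""
--     entries = [_entry(x) for x in list_]
--     pieces = [whitespace]
--     i = 0
--     r = 0
--     while i < len(entries):
--         chunk = entries[i:i + r + 1]
--         pieces.extend(e.ljust(3) for e in chunk)
--         if len(chunk) == r + 1:
--             pieces.append("\n" + whitespace)
--         i += r + 1
--         r += 1
--     return "".join(pieces)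
-- ===== Notes on version B (the rewrite author's own statement) =====
-- stated objective: alternative
-- what changed: A threads per-item column/row counters and grows one string by repeated concatenation; B slices the formatted entries into rows of sizes 1,2,3,... in a while loop over slices, appends the newline piece only when a row is full, and joins the piece list once at the end.
import Mathlib
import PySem

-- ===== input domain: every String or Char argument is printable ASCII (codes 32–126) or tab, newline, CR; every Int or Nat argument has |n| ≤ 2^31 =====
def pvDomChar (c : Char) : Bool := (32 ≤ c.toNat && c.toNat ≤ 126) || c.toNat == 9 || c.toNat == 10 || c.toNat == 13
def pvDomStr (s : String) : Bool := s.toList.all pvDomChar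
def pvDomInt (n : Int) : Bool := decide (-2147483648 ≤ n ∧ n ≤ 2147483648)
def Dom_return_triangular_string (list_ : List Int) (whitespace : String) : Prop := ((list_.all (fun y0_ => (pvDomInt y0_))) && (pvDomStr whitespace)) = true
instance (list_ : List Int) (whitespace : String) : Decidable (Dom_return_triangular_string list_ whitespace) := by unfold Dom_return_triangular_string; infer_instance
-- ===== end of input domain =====

-- B replaces A's per-item column/row counters with a row-wise decomposition (slice rows of
-- sizes 1,2,3,… and join the pieces once); objective: simpler/alternative, same cost.
-- Note: list_ : List Int, so A's str/list/set/dict branches are dead in the port; every item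
-- takes the `else: entry = str(item)` branch (exact for int items).

-- ===== PORT A =====
-- entry.ljust(3): pad on the right with spaces to width 3 (exact hand port of str.ljust)
def pvLjust3 (cs : List Char) : List Char := cs ++ List.replicate (3 - cs.length) ' '

-- A's loop body: append the entry, bump column, and on a full row append "\n"+whitespace
def pvStepA (ws : List Char) (st : List Char × Nat × Nat) (item : Int) : List Char × Nat × Nat :=
  let entry := PySem.Int.toChars item
  let s := st.1 ++ pvLjust3 entry
  let column := st.2.1 + 1
  let row := st.2.2
  if row = column then (s ++ ('\n' :: ws), 0, row + 1)
  else (s, column, row)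

-- Python str concatenation ported over List Char (String.append is kernel-opaque)
def return_triangular_string (list_ : List Int) (whitespace : String) : String :=
  String.ofList (list_.foldl (pvStepA whitespace.toList) (whitespace.toList, 0, 1)).1

-- ===== PORT B =====
-- Source B's while loop: slice off the next row of r+1 entries, ljust each, add the
-- newline piece only when the row is full; structural recursion on the remaining entries.
def pvRows (ws : List Char) : List (List Char) → Nat → List (List Char)
  | [], _ => []
  | e :: es, r =>
    let chunk := (e :: es).take (r + 1)
    (chunk.map pvLjust3 ++
      (if chunk.length = r + 1 then [('\n' :: ws)] else [])) ++
      pvRows ws ((e :: es).drop (r + 1)) (r + 1)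
  termination_by es _ => es.length
  decreasing_by simp

-- "".join(pieces) = concatenation of the pieces (exact for the empty separator)
def return_triangular_string_alt (list_ : List Int) (whitespace : String) : String :=
  String.ofList
    ((whitespace.toList :: pvRows whitespace.toList (list_.map PySem.Int.toChars) 0).flatten)

-- ===== PRECONDITION & SPEC =====
def Spec_return_triangular_string (list_ : List Int) (whitespace : String) (out : String) : Prop := out = return_triangular_string_alt list_ whitespace
instance (list_ : List Int) (whitespace : String) (out : String) : Decidable (Spec_return_triangular_string list_ whitespace out) := by unfold Spec_return_triangular_string; infer_instance

-- ===== CLAIM (what is proved, stated in full; the proofs are below) =====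
def Claim_equal_return_triangular_string : Prop := ∀ (list_ : List Int) (whitespace : String), Dom_return_triangular_string list_ whitespace → Spec_return_triangular_string list_ whitespace (return_triangular_string list_ whitespace)

-- ===== LEMMAS AND PROOFS =====

-- Proof-side itemised form of B's row decomposition: `rem` entries are still missing from
-- the current row, the next row has size `row + 1`.
def pvG (ws : List Char) : List (List Char) → Nat → Nat → List (List Char)
  | [], _, _ => []
  | e :: es, rem, row =>
    pvLjust3 e ::
      (if rem = 1 then ('\n' :: ws) :: pvG ws es (row + 1) (row + 1)
       else pvG ws es (rem - 1) row)

theorem pvG_take_drop (ws : List Char) (rem : Nat) :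
    ∀ (es : List (List Char)) (row : Nat), 1 ≤ rem →
      pvG ws es rem row =
        (es.take rem).map pvLjust3 ++
          (if rem ≤ es.length then ('\n' :: ws) :: pvG ws (es.drop rem) (row + 1) (row + 1)
           else []) := by
  induction rem with
  | zero => intro es row h; omega
  | succ n ih =>
    intro es row _
    cases es with
    | nil => simp [pvG]
    | cons e es =>
      cases n with
      | zero => simp [pvG]
      | succ m =>
        simp only [pvG, List.take_succ_cons, List.map_cons, List.drop_succ_cons,
          List.length_cons]
        rw [if_neg (by omega : ¬ (m + 1 + 1 = 1))]
        have hred : m + 1 + 1 - 1 = m + 1 := rfl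
        rw [hred, ih es row (by omega)]
        simp only [List.cons_append]
        by_cases hle : m + 1 ≤ es.length
        · rw [if_pos hle, if_pos (by omega : m + 1 + 1 ≤ es.length + 1)]
        · rw [if_neg hle, if_neg (by omega : ¬ m + 1 + 1 ≤ es.length + 1)]

theorem pvRows_flatten_aux (ws : List Char) :
    ∀ (n : Nat) (es : List (List Char)), es.length ≤ n → ∀ (r : Nat),
      (pvRows ws es r).flatten = (pvG ws es (r + 1) (r + 1)).flatten := by
  intro n
  induction n with
  | zero =>
    intro es hn r
    have : es = [] := List.eq_nil_of_length_eq_zero (by omega)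
    subst this
    rw [pvRows]
    simp [pvG]
  | succ n ih =>
    intro es hn r
    cases es with
    | nil => rw [pvRows]; simp [pvG]
    | cons e es' =>
      rw [pvRows, pvG_take_drop ws (r + 1) (e :: es') (r + 1) (by omega)]
      by_cases h : r + 1 ≤ (e :: es').length
      · have h' : r ≤ es'.length := by simp only [List.length_cons] at h; omega
        have hdrop' : (es'.drop r).length ≤ n := by
          simp only [List.length_drop, List.length_cons] at hn ⊢; omega
        simp [List.flatten_append, h', ih _ hdrop' (r + 1)]
      · have h' : ¬ r ≤ es'.length := by simp only [List.length_cons] at h; omega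
        have hdrop : (e :: es').drop (r + 1) = [] := by
          apply List.drop_eq_nil_of_le
          simp only [List.length_cons] at h ⊢; omega
        rw [hdrop, pvRows]
        simp [h']

theorem pvRows_flatten (ws : List Char) (es : List (List Char)) (r : Nat) :
    (pvRows ws es r).flatten = (pvG ws es (r + 1) (r + 1)).flatten :=
  pvRows_flatten_aux ws es.length es (le_refl _) r

theorem pvFold_eq_pvG (ws : List Char) :
    ∀ (l : List Int) (acc : List Char) (c r : Nat), c < r →
      (l.foldl (pvStepA ws) (acc, c, r)).1 =
        acc ++ (pvG ws (l.map PySem.Int.toChars) (r - c) r).flatten := by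
  intro l
  induction l with
  | nil => intro acc c r h; simp [pvG]
  | cons x xs ih =>
    intro acc c r h
    rw [List.foldl_cons, List.map_cons]
    by_cases hrc : r = c + 1
    · have hstep : pvStepA ws (acc, c, r) x =
          (acc ++ pvLjust3 (PySem.Int.toChars x) ++ ('\n' :: ws), 0, r + 1) := by
        simp [pvStepA, hrc]
      rw [hstep, ih _ 0 (r + 1) (by omega)]
      have hrem : r - c = 1 := by omega
      simp [pvG, hrem, List.append_assoc]
    · have hstep : pvStepA ws (acc, c, r) x =
          (acc ++ pvLjust3 (PySem.Int.toChars x), c + 1, r) := by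
        simp [pvStepA]; omega
      rw [hstep, ih _ (c + 1) r (by omega)]
      have hrem : r - c ≠ 1 := by omega
      have hsub : r - (c + 1) = r - c - 1 := by omega
      simp [pvG, hrem, hsub, List.append_assoc]

-- ===== VERDICT (by name: the statement is the Claim_ definition above) =====
theorem return_triangular_string_spec : Claim_equal_return_triangular_string := by
  intro list_ whitespace _
  unfold Spec_return_triangular_string return_triangular_string return_triangular_string_alt
  rw [pvFold_eq_pvG whitespace.toList list_ whitespace.toList 0 1 (by omega),
    List.flatten_cons, pvRows_flatten]
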